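-- pv_equiv track=rewrite | github.com/Saisoft-Global/neovision | b/routers/inference.py | _quad_to_bbox
-- ===== SOURCE A (Python) =====
-- from typing import Dict, Any
--
-- def _quad_to_bbox(box: Any) -> Any:
--     try:
--         # box is [[x1,y1],[x2,y2],[x3,y3],[x4,y4]]
--         xs = [p[0] for p in box]
--         ys = [p[1] for p in box]
--         x = min(xs)
--         y = min(ys)
--         w = max(xs) - x
--         h = max(ys) - y
--         return [x, y, w, h]
--     except Exception:
--         return None
-- ===== SOURCE B (Python) =====
-- def _quad_to_bbox(box):
--     try:
--         xs = sorted(p[0] for p in box)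
--         ys = sorted(p[1] for p in box)
--         return [xs[0], ys[0], xs[-1] - xs[0], ys[-1] - ys[0]]
--     except Exception:
--         return None
-- ===== Notes on version B (the rewrite author's own statement) =====
-- stated objective: alternative
-- what changed: Instead of scanning for min/max, B sorts each coordinate column and reads the bounding box off the sorted lists' endpoints (xs[0], xs[-1], ys[0], ys[-1]); empty or malformed input still falls through the same try/except to None via the xs[0] IndexError.
import Mathlib
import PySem

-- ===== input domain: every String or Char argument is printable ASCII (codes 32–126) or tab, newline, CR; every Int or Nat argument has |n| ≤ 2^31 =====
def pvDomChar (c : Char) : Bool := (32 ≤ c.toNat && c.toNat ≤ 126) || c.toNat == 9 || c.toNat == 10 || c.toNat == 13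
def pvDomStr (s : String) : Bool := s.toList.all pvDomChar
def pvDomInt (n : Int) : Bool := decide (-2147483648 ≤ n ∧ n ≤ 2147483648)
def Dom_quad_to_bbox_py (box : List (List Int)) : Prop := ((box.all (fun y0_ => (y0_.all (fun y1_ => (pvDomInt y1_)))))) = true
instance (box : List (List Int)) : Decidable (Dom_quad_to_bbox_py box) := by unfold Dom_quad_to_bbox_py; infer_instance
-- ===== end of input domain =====

-- B replaces A's min/max scans by sorting each coordinate column and reading the
-- bounding box off the sorted lists' endpoints; empty/malformed input is still None.

-- ===== PORT A =====
-- [p[i] for p in box]  (raises inside the comprehension when p[i] is out of range)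
def pvCol (box : List (List Int)) (i : Int) : Option (List Int) :=
  match box with
  | [] => some []
  | p :: rest =>
    match PySem.List.pyGet? p i with
    | none => none
    | some v => (pvCol rest i).map (v :: ·)

def quad_to_bbox_py (box : List (List Int)) : Option (List Int) :=
  match pvCol box 0 with
  | none => none
  | some xs =>
    match pvCol box 1 with
    | none => none
    | some ys =>
      match PySem.List.min? xs (fun v => v) with
      | none => none
      | some x =>
        match PySem.List.min? ys (fun v => v) with
        | none => none
        | some y =>
          match PySem.List.max? xs (fun v => v) with
          | none => none
          | some mx =>
            match PySem.List.max? ys (fun v => v) with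
            | none => none
            | some my => some [x, y, mx - x, my - y]

-- ===== PORT B =====
-- sorted(p[i] for p in box): extract the column monadically, then sort it
def pvSortedCol (box : List (List Int)) (i : Int) : Option (List Int) :=
  (box.mapM (fun p => PySem.List.pyGet? p i)).map
    (fun l => PySem.List.sorted l (fun v => v) false)

def quad_to_bbox_py_alt (box : List (List Int)) : Option (List Int) :=
  match pvSortedCol box 0 with
  | none => none
  | some xs =>
    match pvSortedCol box 1 with
    | none => none
    | some ys =>
      match PySem.List.pyGet? xs 0, PySem.List.pyGet? ys 0,
            PySem.List.pyGet? xs (-1), PySem.List.pyGet? ys (-1) with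
      | some x0, some y0, some x1, some y1 => some [x0, y0, x1 - x0, y1 - y0]
      | _, _, _, _ => none

-- ===== PRECONDITION & SPEC =====
def Spec_quad_to_bbox_py (box : List (List Int)) (out : Option (List Int)) : Prop := out = quad_to_bbox_py_alt box
instance (box : List (List Int)) (out : Option (List Int)) : Decidable (Spec_quad_to_bbox_py box out) := by unfold Spec_quad_to_bbox_py; infer_instance

-- ===== CLAIM (what is proved, stated in full; the proofs are below) =====
def Claim_equal_quad_to_bbox_py : Prop := ∀ (box : List (List Int)), Dom_quad_to_bbox_py box → Spec_quad_to_bbox_py box (quad_to_bbox_py box)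

-- ===== LEMMAS AND PROOFS =====

theorem pvCol_of_lt {box : List (List Int)} {n : Nat}
    (h : ∀ p ∈ box, n < p.length) :
    pvCol box (n : Int) = some (box.map (fun p => p.getD n 0)) := by
  induction box with
  | nil => rfl
  | cons p rest ih =>
    have hp : n < p.length := h p (List.mem_cons_self)
    have : PySem.List.pyGet? p (n : Int) = some (p.getD n 0) := by
      rw [PySem.List.pyGet?_natCast]
      simp [List.getElem?_eq_getElem hp]
    simp [pvCol, this, ih (fun q hq => h q (List.mem_cons_of_mem _ hq))]

theorem pvCol_none {box : List (List Int)} {n : Nat}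
    (h : ∃ p ∈ box, p.length ≤ n) :
    pvCol box (n : Int) = none := by
  induction box with
  | nil => simp at h
  | cons p rest ih =>
    rcases h with ⟨q, hq, hlen⟩
    rcases List.mem_cons.mp hq with rfl | hq'
    · have : PySem.List.pyGet? q (n : Int) = none := by
        rw [PySem.List.pyGet?_natCast]
        simp [List.getElem?_eq_none hlen]
      simp [pvCol, this]
    · cases hv : PySem.List.pyGet? p (n : Int) with
      | none => simp [pvCol, hv]
      | some v => simp [pvCol, hv, ih ⟨q, hq', hlen⟩]

theorem pvMapM_of_lt {box : List (List Int)} {n : Nat}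
    (h : ∀ p ∈ box, n < p.length) :
    box.mapM (fun p => PySem.List.pyGet? p (n : Int)) =
      some (box.map (fun p => p.getD n 0)) := by
  induction box with
  | nil => rfl
  | cons p rest ih =>
    have hp : n < p.length := h p (List.mem_cons_self)
    have hg : PySem.List.pyGet? p (n : Int) = some (p.getD n 0) := by
      rw [PySem.List.pyGet?_natCast]
      simp [List.getElem?_eq_getElem hp]
    rw [List.mapM_cons, hg, ih (fun q hq => h q (List.mem_cons_of_mem _ hq))]
    rfl

theorem pvMapM_none {box : List (List Int)} {n : Nat}
    (h : ∃ p ∈ box, p.length ≤ n) :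
    box.mapM (fun p => PySem.List.pyGet? p (n : Int)) = none := by
  induction box with
  | nil => simp at h
  | cons p rest ih =>
    rcases h with ⟨q, hq, hlen⟩
    rcases List.mem_cons.mp hq with rfl | hq'
    · have : PySem.List.pyGet? q (n : Int) = none := by
        rw [PySem.List.pyGet?_natCast]
        simp [List.getElem?_eq_none hlen]
      rw [List.mapM_cons, this]
      rfl
    · cases hv : PySem.List.pyGet? p (n : Int) with
      | none => rw [List.mapM_cons, hv]; rfl
      | some v => rw [List.mapM_cons, hv, ih ⟨q, hq', hlen⟩]; rfl

-- the head of sorted(xs) is min(xs)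
theorem pv_sorted_head {xs : List Int} {v : Int}
    (h : PySem.List.min? xs (fun x => x) = some v) :
    PySem.List.pyGet? (PySem.List.sorted xs (fun x => x) false) 0 = some v := by
  have hne : xs ≠ [] := by
    intro he; exact absurd (he ▸ PySem.List.min?_mem h) List.not_mem_nil
  have hlen : (PySem.List.sorted xs (fun x => x) false).length = xs.length :=
    PySem.List.length_sorted ..
  have hpos : 0 < (PySem.List.sorted xs (fun x => x) false).length := by
    rw [hlen]; exact List.length_pos_iff.mpr hne
  rw [PySem.List.pyGet?_zero, List.getElem?_eq_getElem hpos]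
  congr 1
  have h1 : v ≤ (PySem.List.sorted xs (fun x => x) false)[0] := by
    have hmem : (PySem.List.sorted xs (fun x => x) false)[0] ∈ xs :=
      (PySem.List.mem_sorted ..).mp (List.getElem_mem hpos)
    exact PySem.List.min?_isMin h _ hmem
  have h2 : (PySem.List.sorted xs (fun x => x) false)[0] ≤ v := by
    have hv : v ∈ PySem.List.sorted xs (fun x => x) false :=
      (PySem.List.mem_sorted ..).mpr (PySem.List.min?_mem h)
    obtain ⟨j, hj, hjv⟩ := List.mem_iff_getElem.mp hv
    calc (PySem.List.sorted xs (fun x => x) false)[0]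
        ≤ (PySem.List.sorted xs (fun x => x) false)[j] :=
          PySem.List.key_sorted_getElem_mono _ _ (Nat.zero_le j) hj
      _ = v := hjv
  omega

-- the last element of sorted(xs) is max(xs)
theorem pv_sorted_last {xs : List Int} {v : Int}
    (h : PySem.List.max? xs (fun x => x) = some v) :
    PySem.List.pyGet? (PySem.List.sorted xs (fun x => x) false) (-1) = some v := by
  have hne : xs ≠ [] := by
    intro he; exact absurd (he ▸ PySem.List.max?_mem h) List.not_mem_nil
  have hlen : (PySem.List.sorted xs (fun x => x) false).length = xs.length :=
    PySem.List.length_sorted ..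
  have hpos : 0 < (PySem.List.sorted xs (fun x => x) false).length := by
    rw [hlen]; exact List.length_pos_iff.mpr hne
  rw [PySem.List.pyGet?_neg_one, List.getLast?_eq_getElem?,
    List.getElem?_eq_getElem (by omega)]
  congr 1
  have h1 : (PySem.List.sorted xs (fun x => x) false)[(PySem.List.sorted xs (fun x => x) false).length - 1] ≤ v := by
    have hmem : (PySem.List.sorted xs (fun x => x) false)[(PySem.List.sorted xs (fun x => x) false).length - 1] ∈ xs :=
      (PySem.List.mem_sorted ..).mp (List.getElem_mem _)
    exact PySem.List.max?_isMax h _ hmem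
  have h2 : v ≤ (PySem.List.sorted xs (fun x => x) false)[(PySem.List.sorted xs (fun x => x) false).length - 1] := by
    have hv : v ∈ PySem.List.sorted xs (fun x => x) false :=
      (PySem.List.mem_sorted ..).mpr (PySem.List.max?_mem h)
    obtain ⟨j, hj, hjv⟩ := List.mem_iff_getElem.mp hv
    rw [← hjv]
    exact PySem.List.key_sorted_getElem_mono xs (fun x => x)
      (show j ≤ (PySem.List.sorted xs (fun x => x) false).length - 1 by omega)
      (show (PySem.List.sorted xs (fun x => x) false).length - 1 <
        (PySem.List.sorted xs (fun x => x) false).length by omega)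
  omega

theorem quad_a_none_of_short {box : List (List Int)}
    (h : ∃ p ∈ box, p.length < 2) : quad_to_bbox_py box = none := by
  by_cases h0 : ∃ p ∈ box, p.length = 0
  · have : pvCol box ((0 : Nat) : Int) = none := by
      rcases h0 with ⟨p, hp, hl⟩
      exact pvCol_none ⟨p, hp, by omega⟩
    unfold quad_to_bbox_py
    simp only [Nat.cast_zero] at this
    rw [this]
  · have : pvCol box ((1 : Nat) : Int) = none := by
      rcases h with ⟨p, hp, hl⟩
      refine pvCol_none ⟨p, hp, ?_⟩
      have := fun hh => h0 ⟨p, hp, hh⟩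
      omega
    unfold quad_to_bbox_py
    simp only [Nat.cast_one] at this
    rw [this]
    cases pvCol box 0 <;> rfl

theorem quad_b_none_of_short {box : List (List Int)}
    (h : ∃ p ∈ box, p.length < 2) : quad_to_bbox_py_alt box = none := by
  by_cases h0 : ∃ p ∈ box, p.length = 0
  · have hm : box.mapM (fun p => PySem.List.pyGet? p ((0 : Nat) : Int)) = none := by
      rcases h0 with ⟨p, hp, hl⟩
      exact pvMapM_none ⟨p, hp, by omega⟩
    simp only [Nat.cast_zero] at hm
    simp [quad_to_bbox_py_alt, pvSortedCol, hm]
  · have hm : box.mapM (fun p => PySem.List.pyGet? p ((1 : Nat) : Int)) = none := by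
      rcases h with ⟨p, hp, hl⟩
      refine pvMapM_none ⟨p, hp, ?_⟩
      have := fun hh => h0 ⟨p, hp, hh⟩
      omega
    simp only [Nat.cast_one] at hm
    simp only [quad_to_bbox_py_alt, pvSortedCol, hm, Option.map_none]
    cases (box.mapM (fun p => PySem.List.pyGet? p 0)).map
        (fun l => PySem.List.sorted l (fun v => v) false) <;> rfl

-- ===== VERDICT (by name: the statement is the Claim_ definition above) =====
theorem quad_to_bbox_py_spec : Claim_equal_quad_to_bbox_py := by
  intro box _
  unfold Spec_quad_to_bbox_py
  by_cases hall : ∀ p ∈ box, 2 ≤ p.length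
  · cases box with
    | nil => rfl
    | cons p0 rest =>
      have h0 : ∀ p ∈ p0 :: rest, (0 : Nat) < p.length :=
        fun p hp => by have := hall p hp; omega
      have h1 : ∀ p ∈ p0 :: rest, (1 : Nat) < p.length :=
        fun p hp => by have := hall p hp; omega
      have hc0 := pvCol_of_lt h0
      have hc1 := pvCol_of_lt h1
      have hm0 := pvMapM_of_lt h0
      have hm1 := pvMapM_of_lt h1
      simp only [Nat.cast_zero] at hc0 hm0
      simp only [Nat.cast_one] at hc1 hm1
      set xs := (p0 :: rest).map (fun p => p.getD 0 0) with hxs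
      set ys := (p0 :: rest).map (fun p => p.getD 1 0) with hys
      have hxne : xs ≠ [] := by simp [hxs]
      have hyne : ys ≠ [] := by simp [hys]
      obtain ⟨vx, hvx⟩ := Option.ne_none_iff_exists'.mp
        (by simpa [PySem.List.min?_eq_none_iff] using hxne :
          PySem.List.min? xs (fun v => v) ≠ none)
      obtain ⟨vy, hvy⟩ := Option.ne_none_iff_exists'.mp
        (by simpa [PySem.List.min?_eq_none_iff] using hyne :
          PySem.List.min? ys (fun v => v) ≠ none)
      obtain ⟨wx, hwx⟩ := Option.ne_none_iff_exists'.mp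
        (by simpa [PySem.List.max?_eq_none_iff] using hxne :
          PySem.List.max? xs (fun v => v) ≠ none)
      obtain ⟨wy, hwy⟩ := Option.ne_none_iff_exists'.mp
        (by simpa [PySem.List.max?_eq_none_iff] using hyne :
          PySem.List.max? ys (fun v => v) ≠ none)
      simp only [quad_to_bbox_py, quad_to_bbox_py_alt, pvSortedCol,
        hc0, hc1, hm0, hm1, Option.map_some, hvx, hvy, hwx, hwy,
        pv_sorted_head hvx, pv_sorted_head hvy,
        pv_sorted_last hwx, pv_sorted_last hwy]
  · push Not at hall
    rcases hall with ⟨p, hp, hlen⟩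
    have hshort : p.length < 2 := by omega
    rw [quad_a_none_of_short ⟨p, hp, hshort⟩, quad_b_none_of_short ⟨p, hp, hshort⟩]
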